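-- pv_equiv track=rewrite | github.com/jtrac3er/DFTHE-public | v1/imag.py | pot
-- ===== SOURCE A (Python) =====
-- def mul(x,y,p):
-- 	return ((x[0]*y[0] - x[1]*y[1]) % p, (x[0]*y[1] + x[1]*y[0]) % p)
--
-- def pot(x,n,p):
-- 	binary = [0 if b == '0' else 1 for b in bin(n)[2:]][::-1]
-- 	start = x
-- 	res = (1,0)
--
-- 	for b in binary:
-- 		if b == 1:
-- 			res = mul(res, start, p)
-- 		start = mul(start, start, p)
--
-- 	return res
-- ===== SOURCE B (Python) =====
-- def mul(x,y,p):
-- 	return ((x[0]*y[0] - x[1]*y[1]) % p, (x[0]*y[1] + x[1]*y[0]) % p)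
--
-- def pot(x,n,p):
-- 	# left-to-right square-and-multiply: one accumulator, no squared-base variable
-- 	res = (1,0)
-- 	for c in bin(n)[2:]:
-- 		res = mul(res, res, p)
-- 		if c != '0':
-- 			res = mul(res, x, p)
-- 	return res
-- ===== Notes on version B (the rewrite author's own statement) =====
-- stated objective: simpler
-- what changed: Left-to-right binary square-and-multiply over bin(n)[2:] that squares the single accumulator, replacing A's reversed-bit-list scan that maintains a separate squared-base variable.
-- intended difference: For n = 0 with p = 1 or p < 0 A returns the unreduced literal (1, 0), while B returns (1 % p, 0) (e.g. (0, 0) for p = 1), the intended value since the function's outputs are residues reduced modulo p. — e.g. on pot((2, 1), 0, 1): A returns (1, 0), B returns (0, 0)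
import Mathlib
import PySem

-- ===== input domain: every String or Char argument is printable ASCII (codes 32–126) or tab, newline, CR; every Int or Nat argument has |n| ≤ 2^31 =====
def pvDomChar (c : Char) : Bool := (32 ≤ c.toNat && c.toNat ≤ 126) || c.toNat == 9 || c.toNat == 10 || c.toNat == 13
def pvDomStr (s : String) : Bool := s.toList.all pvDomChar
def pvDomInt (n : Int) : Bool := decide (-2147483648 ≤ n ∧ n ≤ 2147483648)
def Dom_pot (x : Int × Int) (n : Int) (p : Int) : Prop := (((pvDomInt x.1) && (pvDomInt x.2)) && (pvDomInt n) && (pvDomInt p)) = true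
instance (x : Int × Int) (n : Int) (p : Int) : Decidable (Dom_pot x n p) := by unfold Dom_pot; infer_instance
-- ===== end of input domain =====

-- B replaces A's right-to-left scan over a reversed bit list (with a separate squared-base
-- variable) by left-to-right square-and-multiply on a single accumulator; B additionally
-- reduces the result mod p when n = 0 (see D_pot).


-- ===== PORT A =====
-- helper mul(x, y, p): Gaussian-integer product, both components taken % p (Python floor mod)
def mulG (x y : Int × Int) (p : Int) : Int × Int :=
  (PySem.Int.mod (x.1 * y.1 - x.2 * y.2) p, PySem.Int.mod (x.1 * y.2 + x.2 * y.1) p)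

-- bin(n)[2:] as a char list; the slice [2:] on the ASCII string bin(n) is exactly `drop 2`
def binTail (n : Int) : List Char := (PySem.Int.toBinChars0b n).drop 2

-- loop body of A: state (start, res); res is updated from the OLD start, then start is squared
def astep (p : Int) (st : (Int × Int) × (Int × Int)) (b : Int) : (Int × Int) × (Int × Int) :=
  (mulG st.1 st.1 p, if b = 1 then mulG st.2 st.1 p else st.2)

def pot (x : Int × Int) (n : Int) (p : Int) : Int × Int :=
  ((((binTail n).map (fun b => if b = '0' then (0 : Int) else 1)).reverse).foldl
    (astep p) (x, (1, 0))).2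

-- ===== PORT B =====
-- loop body of B: square the accumulator, then multiply by x on a nonzero bit
def bstep (x : Int × Int) (p : Int) (r : Int × Int) (c : Char) : Int × Int :=
  let r2 := mulG r r p
  if c ≠ '0' then mulG r2 x p else r2

def pot_alt (x : Int × Int) (n : Int) (p : Int) : Int × Int :=
  (binTail n).foldl (bstep x p) (1, 0)

-- ===== PRECONDITION & SPEC =====
-- Pre_ excludes only p = 0, where Python's '%' raises ZeroDivisionError in both A and B.
def Pre_pot (x : Int × Int) (n : Int) (p : Int) : Prop := p ≠ 0
instance (x : Int × Int) (n : Int) (p : Int) : Decidable (Pre_pot x n p) := by unfold Pre_pot; infer_instance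
def pvWitness_pot : (Int × Int) × Int × Int := ((2, 1), 5, 7)

-- For n = 0 with p = 1 or p < 0 A returns the unreduced literal (1, 0), while B returns
-- (1 % p, 0) (e.g. (0, 0) for p = 1), the intended value since the function's outputs are
-- residues reduced modulo p.
def D_pot (x : Int × Int) (n : Int) (p : Int) : Prop := n = 0 ∧ (p = 1 ∨ p < 0)
instance (x : Int × Int) (n : Int) (p : Int) : Decidable (D_pot x n p) := by unfold D_pot; infer_instance

def Spec_pot (x : Int × Int) (n : Int) (p : Int) (out : Int × Int) : Prop := ¬ D_pot x n p → out = pot_alt x n p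
instance (x : Int × Int) (n : Int) (p : Int) (out : Int × Int) : Decidable (Spec_pot x n p out) := by unfold Spec_pot; infer_instance

def pvDiffWitness_pot : (Int × Int) × Int × Int := ((2, 1), 0, 1)
def pvDiffWitnessOut_pot : (Int × Int) × (Int × Int) := ((1, 0), (0, 0))

-- ===== CLAIM (what is proved, stated in full; the proofs are below) =====
def Claim_unchanged_pot : Prop := ∀ (x : Int × Int) (n : Int) (p : Int), Dom_pot x n p → Pre_pot x n p → Spec_pot x n p (pot x n p)
def Claim_changed_pot : Prop := Dom_pot (pvDiffWitness_pot.1) (pvDiffWitness_pot.2.1) (pvDiffWitness_pot.2.2) ∧ Pre_pot (pvDiffWitness_pot.1) (pvDiffWitness_pot.2.1) (pvDiffWitness_pot.2.2) ∧ D_pot (pvDiffWitness_pot.1) (pvDiffWitness_pot.2.1) (pvDiffWitness_pot.2.2) ∧ pot (pvDiffWitness_pot.1) (pvDiffWitness_pot.2.1) (pvDiffWitness_pot.2.2) = pvDiffWitnessOut_pot.1 ∧ pot_alt (pvDiffWitness_pot.1) (pvDiffWitness_pot.2.1) (pvDiffWitness_pot.2.2) = pvDiffWitnessOut_pot.2 ∧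 pvDiffWitnessOut_pot.1 ≠ pvDiffWitnessOut_pot.2
def Claim_exact_pot : Prop := ∀ (x : Int × Int) (n : Int) (p : Int), Dom_pot x n p → Pre_pot x n p → D_pot x n p → pot x n p ≠ pot_alt x n p

-- ===== LEMMAS AND PROOFS =====

-- raw (unreduced) Gaussian-integer multiplication and powers, and componentwise reduction
def rmul (a b : Int × Int) : Int × Int := (a.1 * b.1 - a.2 * b.2, a.1 * b.2 + a.2 * b.1)
def redP (p : Int) (a : Int × Int) : Int × Int := (PySem.Int.mod a.1 p, PySem.Int.mod a.2 p)
def rpow (x : Int × Int) : Nat → Int × Int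
  | 0 => (1, 0)
  | k + 1 => rmul x (rpow x k)

def bitN (c : Char) : Nat := if c = '0' then 0 else 1
def valA (v : Nat) (cs : List Char) : Nat := cs.foldl (fun v c => 2 * v + bitN c) v

theorem fmod_shift (a k p : Int) : Int.fmod (a + p * k) p = Int.fmod a p :=
  Int.add_mul_fmod_self_left a p k

theorem mulG_eq (a b : Int × Int) (p : Int) : mulG a b p = redP p (rmul a b) := rfl

theorem rmul_comm (a b : Int × Int) : rmul a b = rmul b a := by
  simp only [rmul, Prod.mk.injEq]; constructor <;> ring

theorem rmul_assoc (a b c : Int × Int) : rmul (rmul a b) c = rmul a (rmul b c) := by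
  simp only [rmul, Prod.mk.injEq]; constructor <;> ring

theorem rmul_one_left (a : Int × Int) : rmul (1, 0) a = a := by
  obtain ⟨a1, a2⟩ := a; simp only [rmul]; norm_num

theorem rmul_one_right (a : Int × Int) : rmul a (1, 0) = a := by
  rw [rmul_comm]; exact rmul_one_left a

theorem red_rmul_left (p : Int) (a b : Int × Int) :
    redP p (rmul (redP p a) b) = redP p (rmul a b) := by
  simp only [redP, rmul, PySem.Int.mod, Prod.mk.injEq]
  rw [Int.fmod_def a.1 p, Int.fmod_def a.2 p]
  constructor
  · have h : (a.1 - p * a.1.fdiv p) * b.1 - (a.2 - p * a.2.fdiv p) * b.2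
        = a.1 * b.1 - a.2 * b.2 + p * (a.2.fdiv p * b.2 - a.1.fdiv p * b.1) := by ring
    rw [h, fmod_shift]
  · have h : (a.1 - p * a.1.fdiv p) * b.2 + (a.2 - p * a.2.fdiv p) * b.1
        = a.1 * b.2 + a.2 * b.1 + p * (-(a.1.fdiv p * b.2) - a.2.fdiv p * b.1) := by ring
    rw [h, fmod_shift]

theorem red_rmul_right (p : Int) (a b : Int × Int) :
    redP p (rmul a (redP p b)) = redP p (rmul a b) := by
  rw [rmul_comm, red_rmul_left, rmul_comm]

theorem red_red (p : Int) (a : Int × Int) : redP p (redP p a) = redP p a := by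
  have h1 := red_rmul_left p a (1, 0)
  rwa [rmul_one_right, rmul_one_right] at h1

theorem rpow_add (x : Int × Int) (a b : Nat) :
    rmul (rpow x a) (rpow x b) = rpow x (a + b) := by
  induction a with
  | zero => simp [rpow, rmul_one_left]
  | succ a ih =>
      show rmul (rmul x (rpow x a)) (rpow x b) = rpow x (a + 1 + b)
      rw [rmul_assoc, ih]
      have : a + 1 + b = (a + b) + 1 := by omega
      rw [this]; rfl

theorem rpow_one (x : Int × Int) : rpow x 1 = x := by
  show rmul x (1, 0) = x; exact rmul_one_right x

theorem rmul_rpow_succ (x : Int × Int) (k : Nat) : rmul (rpow x k) x = rpow x (k + 1) := by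
  have h := rpow_add x k 1
  rwa [rpow_one] at h

-- squaring a reduced power
theorem mulG_sq (x : Int × Int) (p : Int) (v : Nat) :
    mulG (redP p (rpow x v)) (redP p (rpow x v)) p = redP p (rpow x (v + v)) := by
  rw [mulG_eq, red_rmul_left, red_rmul_right, rpow_add]

-- one step of B from a reduced power
theorem bstep_red (x : Int × Int) (p : Int) (v : Nat) (c : Char) :
    bstep x p (redP p (rpow x v)) c = redP p (rpow x (2 * v + bitN c)) := by
  unfold bstep
  rw [mulG_sq]
  split_ifs with h
  · have hb : bitN c = 1 := by unfold bitN; rw [if_neg (by simpa using h)]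
    rw [mulG_eq, red_rmul_left, rmul_rpow_succ, hb,
      show 2 * v + 1 = v + v + 1 by omega]
  · have hb : bitN c = 0 := by unfold bitN; rw [if_pos (by simpa using h)]
    rw [hb, Nat.add_zero, Nat.two_mul]

theorem B_inv (x : Int × Int) (p : Int) (cs : List Char) :
    ∀ v : Nat, cs.foldl (bstep x p) (redP p (rpow x v)) = redP p (rpow x (valA v cs)) := by
  induction cs with
  | nil => intro v; rfl
  | cons c rest ih =>
      intro v
      show rest.foldl (bstep x p) (bstep x p (redP p (rpow x v)) c)
          = redP p (rpow x (valA v (c :: rest)))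
      rw [bstep_red, ih (2 * v + bitN c)]
      rfl

-- first step of B from the literal (1,0)
theorem bstep_one (x : Int × Int) (p : Int) (c : Char) :
    bstep x p (1, 0) c = redP p (rpow x (bitN c)) := by
  have h0 : mulG (1, 0) (1, 0) p = redP p (rpow x 0) := by
    rw [mulG_eq]; rfl
  unfold bstep
  rw [h0]
  split_ifs with h
  · have hb : bitN c = 1 := by unfold bitN; rw [if_neg (by simpa using h)]
    rw [mulG_eq, red_rmul_left, rmul_rpow_succ, hb]
  · have hb : bitN c = 0 := by unfold bitN; rw [if_pos (by simpa using h)]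
    rw [hb]

theorem pot_alt_char (x : Int × Int) (n : Int) (p : Int) (c : Char) (rest : List Char)
    (h : binTail n = c :: rest) :
    pot_alt x n p = redP p (rpow x (valA 0 (binTail n))) := by
  unfold pot_alt
  rw [h]
  show rest.foldl (bstep x p) (bstep x p (1, 0) c) = _
  rw [bstep_one, B_inv]
  have : valA 0 (c :: rest) = valA (bitN c) rest := by
    show valA (2 * 0 + bitN c) rest = valA (bitN c) rest
    norm_num
  rw [this]

theorem valA_cons (c : Char) (rest : List Char) (v : Nat) :
    valA v (c :: rest) = valA (2 * v + bitN c) rest := rfl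

theorem valA_split (cs : List Char) : ∀ v : Nat, valA v cs = v * 2 ^ cs.length + valA 0 cs := by
  induction cs with
  | nil => intro v; simp [valA]
  | cons c rest ih =>
      intro v
      show valA (2 * v + bitN c) rest = v * 2 ^ (c :: rest).length + valA (2 * 0 + bitN c) rest
      rw [ih (2 * v + bitN c), ih (2 * 0 + bitN c)]
      simp [List.length_cons, pow_succ]
      ring

-- the bit value A maps a char to
theorem bit_map (c : Char) : (if c = '0' then (0 : Int) else 1) = (bitN c : Int) := by
  unfold bitN; split <;> simp

-- A's folded state after processing a big-endian char list (via foldr = foldl over reverse)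
theorem A_inv (x : Int × Int) (p : Int) (cs : List Char) :
    (cs.foldr (fun c st => astep p st ((bitN c : Int))) (x, (1, 0))).1
      = (if cs = [] then x else redP p (rpow x (2 ^ cs.length)))
    ∧ (cs.foldr (fun c st => astep p st ((bitN c : Int))) (x, (1, 0))).2
      = (if valA 0 cs = 0 then (1, 0) else redP p (rpow x (valA 0 cs))) := by
  induction cs with
  | nil => simp [valA]
  | cons c rest ih =>
      obtain ⟨ihS, ihR⟩ := ih
      rw [List.foldr_cons]
      set t := List.foldr (fun c st => astep p st ((bitN c : Int))) (x, (1, 0)) rest with ht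
      have hS1 : (astep p t ((bitN c : Int))).1 = mulG t.1 t.1 p := rfl
      have hS2 : (astep p t ((bitN c : Int))).2
          = if (bitN c : Int) = 1 then mulG t.2 t.1 p else t.2 := rfl
      have hval : valA 0 (c :: rest) = bitN c * 2 ^ rest.length + valA 0 rest := by
        rw [valA_cons, valA_split rest (2 * 0 + bitN c)]
        ring
      constructor
      · rw [hS1, ihS, if_neg (List.cons_ne_nil c rest)]
        by_cases hr : rest = []
        · subst hr
          rw [if_pos rfl, mulG_eq]
          have h2 : rpow x 2 = rmul x x := by
            show rmul x (rmul x (1, 0)) = rmul x x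
            rw [rmul_one_right]
          rw [← h2]
          norm_num
        · rw [if_neg hr, mulG_sq, List.length_cons, pow_succ, Nat.mul_two]
      · rw [hS2, ihR, ihS]
        by_cases hc : c = '0'
        · have hb : (bitN c : Int) ≠ 1 := by subst hc; simp [bitN]
          rw [if_neg hb]
          have hv0 : valA 0 (c :: rest) = valA 0 rest := by
            rw [hval]; subst hc; simp [bitN]
          rw [hv0]
        · have hbn : bitN c = 1 := by simp [bitN, hc]
          have hb : (bitN c : Int) = 1 := by rw [hbn]; rfl
          rw [if_pos hb]
          have hne : valA 0 (c :: rest) ≠ 0 := by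
            rw [hval, hbn]; positivity
          rw [if_neg hne, hval, hbn, one_mul]
          by_cases hv : valA 0 rest = 0
          · rw [if_pos hv, hv, Nat.add_zero]
            by_cases hr : rest = []
            · subst hr
              rw [if_pos rfl, mulG_eq, rmul_one_left]
              simp only [List.length_nil, pow_zero, rpow_one]
            · rw [if_neg hr, mulG_eq, rmul_one_left, red_red]
          · have hr : rest ≠ [] := by
              intro h; subst h; exact hv rfl
            rw [if_neg hv, if_neg hr, mulG_eq, red_rmul_left, red_rmul_right, rpow_add,
              Nat.add_comm]

theorem pot_char (x : Int × Int) (n : Int) (p : Int) :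
    pot x n p = (if valA 0 (binTail n) = 0 then ((1 : Int), (0 : Int))
                 else redP p (rpow x (valA 0 (binTail n)))) := by
  unfold pot
  rw [List.foldl_reverse, List.foldr_map]
  have hfun : (fun c (st : (Int × Int) × (Int × Int)) =>
        astep p st (if c = '0' then (0 : Int) else 1))
      = fun c st => astep p st ((bitN c : Int)) := by
    funext c st
    rw [bit_map]
  rw [hfun]
  exact (A_inv x p (binTail n)).2

-- value of the core binary digits: valA 0 (Nat.toDigitsCore 2 f m acc) resumes as valA m acc
theorem toDigitsCore_val (f : Nat) :
    ∀ m acc, m < 2 ^ f → valA 0 (Nat.toDigitsCore 2 f m acc) = valA m acc := by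
  induction f with
  | zero =>
      intro m acc hm
      interval_cases m
      rfl
  | succ f ih =>
      intro m acc hm
      show valA 0 (Nat.toDigitsCore 2 (f + 1) m acc) = valA m acc
      rw [Nat.toDigitsCore]
      by_cases h2 : m / 2 = 0
      · rw [if_pos h2]
        have hm2 : m % 2 = m := by omega
        have : valA 0 ((m % 2).digitChar :: acc) = valA (m % 2) acc := by
          show valA (2 * 0 + bitN (m % 2).digitChar) acc = valA (m % 2) acc
          have : 2 * 0 + bitN (m % 2).digitChar = m % 2 := by
            have h01 : m % 2 = 0 ∨ m % 2 = 1 := by omega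
            rcases h01 with h | h <;> rw [h] <;> rfl
          rw [this]
        rw [this, hm2]
      · simp only [if_neg h2]
        rw [ih (m / 2) ((m % 2).digitChar :: acc) (by omega)]
        show valA (m / 2) ((m % 2).digitChar :: acc) = valA m acc
        show valA (2 * (m / 2) + bitN (m % 2).digitChar) acc = valA m acc
        have : 2 * (m / 2) + bitN (m % 2).digitChar = m := by
          have h01 : m % 2 = 0 ∨ m % 2 = 1 := by omega
          rcases h01 with h | h
          · have : bitN (m % 2).digitChar = 0 := by rw [h]; rfl
            omega
          · have : bitN (m % 2).digitChar = 1 := by rw [h]; rfl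
            omega
        rw [this]

theorem toDigits_val (m : Nat) : valA 0 (Nat.toDigits 2 m) = m := by
  have h := toDigitsCore_val (m + 1) m [] (by
    calc m < 2 ^ m := Nat.lt_two_pow_self
    _ ≤ 2 ^ (m + 1) := Nat.pow_le_pow_right (by omega) (by omega))
  simpa [valA] using h

theorem binTail_pos (n : Int) (hn : 0 ≤ n) : binTail n = Nat.toDigits 2 n.toNat := by
  unfold binTail PySem.Int.toBinChars0b
  rw [if_neg (by omega)]
  rfl

theorem binTail_neg (n : Int) (hn : n < 0) : binTail n = 'b' :: Nat.toDigits 2 n.natAbs := by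
  unfold binTail PySem.Int.toBinChars0b
  rw [if_pos hn]
  rfl

theorem toDigits_ne_nil (m : Nat) : Nat.toDigits 2 m ≠ [] := by
  unfold Nat.toDigits
  rw [Nat.toDigitsCore]
  by_cases h2 : m / 2 = 0
  · simp [h2]
  · simp only [if_neg h2]
    -- toDigitsCore with nonempty accumulator is nonempty
    have key : ∀ f m (acc : List Char), acc ≠ [] → Nat.toDigitsCore 2 f m acc ≠ [] := by
      intro f
      induction f with
      | zero => intro m acc h; exact h
      | succ f ih =>
          intro m acc h
          rw [Nat.toDigitsCore]
          by_cases hh : m / 2 = 0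
          · simp [hh]
          · simp only [if_neg hh]
            exact ih _ _ (by simp)
    exact key _ _ _ (by simp)

theorem binTail_ne_nil (n : Int) : binTail n ≠ [] := by
  by_cases hn : n < 0
  · rw [binTail_neg n hn]; simp
  · rw [binTail_pos n (by omega)]; exact toDigits_ne_nil _

theorem val_binTail_ne_zero (n : Int) (hn : n ≠ 0) : valA 0 (binTail n) ≠ 0 := by
  by_cases hneg : n < 0
  · rw [binTail_neg n hneg]
    show valA (2 * 0 + bitN 'b') _ ≠ 0
    have : bitN 'b' = 1 := rfl
    rw [valA_split]
    simp [this]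
  · rw [binTail_pos n (by omega), toDigits_val]
    omega

theorem binTail_zero : binTail 0 = ['0'] := by decide

theorem pot_zero (x : Int × Int) (p : Int) : pot x 0 p = (1, 0) := by
  rw [pot_char]
  rw [binTail_zero]
  rfl

theorem pot_alt_zero (x : Int × Int) (p : Int) :
    pot_alt x 0 p = (Int.fmod 1 p, Int.fmod 0 p) := by
  unfold pot_alt
  rw [binTail_zero]
  show bstep x p (1, 0) '0' = _
  rw [bstep_one]
  have : bitN '0' = 0 := rfl
  rw [this]
  rfl

theorem fmod_one_ne_one_of_D (p : Int) (hp : p ≠ 0) (hD : p = 1 ∨ p < 0) :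
    Int.fmod 1 p ≠ 1 := by
  rcases hD with h1 | hneg
  · subst h1; decide
  · by_cases hdvd : p ∣ 1
    · have : p = -1 := by
        rcases Int.isUnit_iff.mp (isUnit_of_dvd_one hdvd) with h | h
        · omega
        · exact h
      subst this; decide
    · have h := Int.fmod_eq_emod (a := 1) (b := p)
      rw [if_neg (by rw [not_or]; exact ⟨by omega, hdvd⟩)] at h
      have h1 : (0 : Int) ≤ 1 % p := Int.emod_nonneg 1 hp
      have h2 : 1 % p < (p.natAbs : Int) := Int.emod_lt 1 hp
      have h3 : (p.natAbs : Int) = -p := by omega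
      omega

-- ===== VERDICT (by name: the statement is the Claim_ definition above) =====
theorem pot_spec : Claim_unchanged_pot := by
  intro x n p _ hp hD
  by_cases hn : n = 0
  · -- ¬D with n = 0 forces 0 < p and p ≠ 1, so both sides are the reduced (1, 0)
    subst hn
    have hD' : ¬ (p = 1 ∨ p < 0) := fun h => hD ⟨rfl, h⟩
    rw [not_or, Int.not_lt] at hD'
    obtain ⟨hne1, hge⟩ := hD'
    have hp0 : p ≠ 0 := hp
    have hp2 : 2 ≤ p := by omega
    rw [pot_zero, pot_alt_zero]
    have h1 : Int.fmod 1 p = 1 := by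
      rw [Int.fmod_eq_emod, if_pos (Or.inl hge), add_zero]
      exact Int.emod_eq_of_lt (by omega) (by omega)
    have h0 : Int.fmod 0 p = 0 := Int.zero_fmod p
    rw [h1, h0]
  · obtain ⟨c, rest, hcs⟩ : ∃ c rest, binTail n = c :: rest := by
      cases h : binTail n with
      | nil => exact absurd h (binTail_ne_nil n)
      | cons c rest => exact ⟨c, rest, rfl⟩
    rw [pot_char, pot_alt_char x n p c rest hcs, if_neg (val_binTail_ne_zero n hn)]

theorem pot_changed : Claim_changed_pot := by unfold Claim_changed_pot; decide

theorem pot_tight : Claim_exact_pot := by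
  intro x n p _ hp hD
  obtain ⟨hn, hpD⟩ := hD
  subst hn
  rw [pot_zero, pot_alt_zero]
  intro h
  have h1 : Int.fmod 1 p = 1 := (Prod.mk.injEq _ _ _ _ ▸ h.symm).1
  exact fmod_one_ne_one_of_D p hp hpD h1
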